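-- pv_equiv track=rewrite | github.com/JamesAskelson/dsa-solutions | random-leetcode/sum-78/py.py | sum78
-- ===== SOURCE A (Python) =====
-- def sum78(nums):
--   max_total = 0
--   inside = False
--
--   for num in nums:
--     if num == 7:
--       inside = True
--     elif inside == False:
--       max_total  = max_total  + num
--     elif inside == True and num == 8:
--       inside = False
--   return max_total
-- ===== SOURCE B (Python) =====
-- def sum78(nums):
--     it = iter(nums)
--     total = 0
--     for num in it:
--         if num == 7:
--             for inner in it:
--                 if inner == 8:
--                     break
--         else:
--             total += num
--     return total
-- ===== Notes on version B (the rewrite author's own statement) =====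
-- stated objective: alternative
-- what changed: Replaces the inside boolean flag state machine with nested loops over one shared iterator: hitting 7 enters an inner loop that consumes elements until 8, so no flag variable exists.
import Mathlib
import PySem

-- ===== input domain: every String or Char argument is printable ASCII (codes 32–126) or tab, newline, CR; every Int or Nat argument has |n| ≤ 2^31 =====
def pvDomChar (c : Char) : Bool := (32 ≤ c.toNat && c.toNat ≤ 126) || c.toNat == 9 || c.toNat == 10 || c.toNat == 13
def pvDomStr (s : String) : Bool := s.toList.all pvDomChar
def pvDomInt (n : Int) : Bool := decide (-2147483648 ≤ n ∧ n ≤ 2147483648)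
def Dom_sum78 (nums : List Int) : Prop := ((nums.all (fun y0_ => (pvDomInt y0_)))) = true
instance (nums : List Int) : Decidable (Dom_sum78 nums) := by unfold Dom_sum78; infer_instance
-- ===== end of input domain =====

-- B replaces A's boolean `inside` flag with nested loops over one shared iterator (alternative decomposition, same cost).


-- ===== PORT A =====
-- the `for num in nums` loop with state (max_total, inside)
def sum78Go (max_total : Int) (inside : Bool) : List Int → Int
  | [] => max_total
  | num :: rest =>
    if num = 7 then sum78Go max_total true rest
    else if inside = false then sum78Go (max_total + num) inside rest
    else if inside = true ∧ num = 8 then sum78Go max_total false rest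
    else sum78Go max_total inside rest

def sum78 (nums : List Int) : Int := sum78Go 0 false nums

-- ===== PORT B =====
-- the inner `for inner in it: if inner == 8: break`: consume up to and including the first 8
def skipUntil8 : List Int → List Int
  | [] => []
  | x :: rest => if x = 8 then rest else skipUntil8 rest

theorem skipUntil8_length_le (l : List Int) : (skipUntil8 l).length ≤ l.length := by
  induction l with
  | nil => simp [skipUntil8]
  | cons x rest ih => simp [skipUntil8]; split <;> omega

-- the outer `for num in it` loop over the shared iterator, with the running total
def sum78AltGo (total : Int) : List Int → Int
  | [] => total
  | num :: rest =>
    if num = 7 then sum78AltGo total (skipUntil8 rest)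
    else sum78AltGo (total + num) rest
termination_by l => l.length
decreasing_by
  · exact Nat.lt_succ_of_le (skipUntil8_length_le rest)
  · simp

def sum78_alt (nums : List Int) : Int := sum78AltGo 0 nums

-- ===== PRECONDITION & SPEC =====
def Spec_sum78 (nums : List Int) (out : Int) : Prop := out = sum78_alt nums
instance (nums : List Int) (out : Int) : Decidable (Spec_sum78 nums out) := by unfold Spec_sum78; infer_instance

-- ===== CLAIM (what is proved, stated in full; the proofs are below) =====
def Claim_equal_sum78 : Prop := ∀ (nums : List Int), Dom_sum78 nums → Spec_sum78 nums (sum78 nums)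

-- ===== LEMMAS AND PROOFS =====
-- A's loop in the `inside = true` state ignores everything until the first 8, i.e. skipUntil8.
theorem sum78Go_true (l : List Int) (t : Int) :
    sum78Go t true l = sum78Go t false (skipUntil8 l) := by
  induction l generalizing t with
  | nil => simp [skipUntil8, sum78Go]
  | cons x rest ih =>
    by_cases h7 : x = 7
    · subst h7; simp [sum78Go, skipUntil8, ih]
    · by_cases h8 : x = 8
      · subst h8; simp [sum78Go, skipUntil8] at *
      · simp [sum78Go, skipUntil8, h7, h8, ih]

theorem sum78Go_eq_alt (n : ℕ) (l : List Int) (t : Int) (hn : l.length ≤ n) :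
    sum78Go t false l = sum78AltGo t l := by
  induction n generalizing l t with
  | zero =>
    have : l = [] := by cases l <;> simp_all
    subst this; simp [sum78Go, sum78AltGo]
  | succ n ih =>
    cases l with
    | nil => simp [sum78Go, sum78AltGo]
    | cons x rest =>
      simp at hn
      by_cases h7 : x = 7
      · subst h7
        simp [sum78Go, sum78AltGo, sum78Go_true]
        exact ih _ _ (le_trans (skipUntil8_length_le rest) hn)
      · simp [sum78Go, sum78AltGo, h7]
        exact ih _ _ hn

-- ===== VERDICT (by name: the statement is the Claim_ definition above) =====
theorem sum78_spec : Claim_equal_sum78 := by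
  intro nums _
  unfold Spec_sum78 sum78 sum78_alt
  exact sum78Go_eq_alt nums.length nums 0 le_rfl
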